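-- pv_equiv track=rewrite | github.com/BeniersD/Apeiron | Apeiron/apeiron/layers/layer01_foundational/decomposition.py | _detect_homogeneous_blocks
-- ===== SOURCE A (Python) =====
-- from typing import Any, Callable, Dict, Iterator, List, Optional, Sequence, Tuple
--
-- def _detect_homogeneous_blocks(s: str) -> Optional[int]:
--     """
--     Detecteert of de string bestaat uit precies twee homogene blokken
--     (bijv. 'aaabbb'). Retourneert de splitspositie of None.
--
--     Een homogeen blok is een maximale deelrij van identieke tekens.
--     """
--     if len(s) < 2:
--         return None
--     first_char = s[0]
--     i = 1
--     while i < len(s) and s[i] == first_char: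
--         i += 1
--     if i == len(s):
--         return None  # Slechts één blok
--     second_char = s[i]
--     for j in range(i + 1, len(s)):
--         if s[j] != second_char:
--             return None  # Meer dan twee blokken
--     return i  # Splitspositie: einde eerste blok
-- ===== SOURCE B (Python) =====
-- from itertools import groupby
-- from typing import Optional
--
-- def _detect_homogeneous_blocks(s: str) -> Optional[int]:
--     """Group s into maximal runs; exactly two runs => split at end of first."""
--     if len(s) < 2:
--         return None
--     runs = [sum(1 for _ in g) for _, g in groupby(s)]
--     return runs[0] if len(runs) == 2 else None
-- ===== Notes on version B (the rewrite author's own statement) =====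
-- stated objective: idiomatic
-- what changed: Replaces the sentinel two-phase index scan (while over the first run, then a for over the rest) by itertools.groupby: build the list of maximal-run lengths once and return the first length iff there are exactly two runs.
import Mathlib
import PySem

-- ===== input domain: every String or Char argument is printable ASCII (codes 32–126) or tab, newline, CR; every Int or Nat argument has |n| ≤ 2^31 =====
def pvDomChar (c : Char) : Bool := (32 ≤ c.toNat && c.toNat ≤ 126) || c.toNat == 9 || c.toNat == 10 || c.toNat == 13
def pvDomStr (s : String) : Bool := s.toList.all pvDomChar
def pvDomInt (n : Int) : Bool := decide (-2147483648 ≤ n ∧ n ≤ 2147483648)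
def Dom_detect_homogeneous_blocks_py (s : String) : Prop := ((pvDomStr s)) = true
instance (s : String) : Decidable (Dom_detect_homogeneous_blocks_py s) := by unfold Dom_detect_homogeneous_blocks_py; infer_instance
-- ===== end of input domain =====

-- B replaces A's two-phase sentinel index scan by grouping into maximal runs and
-- counting them (itertools.groupby style); objective: idiomatic, same cost.

-- ===== PORT A =====
-- while i < len(s) and s[i] == first_char: i += 1
def pvAWhile (cs : List Char) (first : Char) (i : Nat) : Nat :=
  if h : i < cs.length then
    if cs[i] = first then pvAWhile cs first (i + 1) else i
  else i
termination_by cs.length - i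

-- for j in range(i+1, len(s)): if s[j] != second_char: return None; return i
def pvAFor (cs : List Char) (second : Char) (j : Nat) (res : Int) : Option Int :=
  if h : j < cs.length then
    if cs[j] ≠ second then none else pvAFor cs second (j + 1) res
  else some res
termination_by cs.length - j

def detect_homogeneous_blocks_py (s : String) : Option Int :=
  let cs := s.toList
  if cs.length < 2 then none
  else
    let first := cs.getD 0 ' '      -- s[0], in range since len ≥ 2
    let i := pvAWhile cs first 1
    if i = cs.length then none      -- only one block
    else
      let second := cs.getD i ' '   -- s[i], in range
      pvAFor cs second (i + 1) (Int.ofNat i)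

-- ===== PORT B =====
-- run lengths of the maximal homogeneous blocks (itertools.groupby)
def pvRunsAux (c : Char) (n : Nat) : List Char → List Nat
  | [] => [n]
  | d :: rest => if d = c then pvRunsAux c (n + 1) rest else n :: pvRunsAux d 1 rest

def pvRuns : List Char → List Nat
  | [] => []
  | c :: rest => pvRunsAux c 1 rest

def detect_homogeneous_blocks_py_alt (s : String) : Option Int :=
  let cs := s.toList
  if cs.length < 2 then none
  else
    match pvRuns cs with
    | [a, _] => some (Int.ofNat a)
    | _ => none

-- ===== PRECONDITION & SPEC =====
def Spec_detect_homogeneous_blocks_py (s : String) (out : Option Int) : Prop := out = detect_homogeneous_blocks_py_alt s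
instance (s : String) (out : Option Int) : Decidable (Spec_detect_homogeneous_blocks_py s out) := by unfold Spec_detect_homogeneous_blocks_py; infer_instance

-- ===== CLAIM (what is proved, stated in full; the proofs are below) =====
def Claim_equal_detect_homogeneous_blocks_py : Prop := ∀ (s : String), Dom_detect_homogeneous_blocks_py s → Spec_detect_homogeneous_blocks_py s (detect_homogeneous_blocks_py s)

-- ===== LEMMAS AND PROOFS =====

-- length of the leading homogeneous run
def pvLead (c : Char) : List Char → Nat
  | [] => 0
  | d :: rest => if d = c then pvLead c rest + 1 else 0

theorem pvLead_le (c : Char) (l : List Char) : pvLead c l ≤ l.length := by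
  induction l with
  | nil => simp [pvLead]
  | cons d r ih => simp only [pvLead, List.length_cons]; split <;> omega

theorem pvLead_eq_length_iff (c : Char) (l : List Char) :
    pvLead c l = l.length ↔ ∀ d ∈ l, d = c := by
  induction l with
  | nil => simp [pvLead]
  | cons d r ih =>
    simp only [pvLead, List.length_cons, List.mem_cons]
    split
    · rename_i h; subst h
      constructor
      · intro he x hx
        rcases hx with h | h
        · exact h
        · exact ih.mp (by omega) x h
      · intro hall; have := ih.mpr (fun x hx => hall x (Or.inr hx)); omega
    · rename_i h
      constructor
      · intro he; have := pvLead_le c r; omega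
      · intro hall; exact absurd (hall d (Or.inl rfl)) h

theorem pvAWhile_eq (cs : List Char) (first : Char) (i : Nat) :
    pvAWhile cs first i = i + pvLead first (cs.drop i) := by
  fun_induction pvAWhile cs first i with
  | case1 i h heq ih =>
    have hd : cs.drop i = cs[i] :: cs.drop (i + 1) := List.drop_eq_getElem_cons h
    rw [ih, hd, pvLead, if_pos heq]; omega
  | case2 i h hne =>
    have hd : cs.drop i = cs[i] :: cs.drop (i + 1) := List.drop_eq_getElem_cons h
    rw [hd, pvLead, if_neg hne]; omega
  | case3 i h =>
    rw [List.drop_eq_nil_of_le (by omega)]; simp [pvLead]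

theorem pvAFor_eq (cs : List Char) (second : Char) (j : Nat) (res : Int) :
    pvAFor cs second j res =
      if ∀ d ∈ cs.drop j, d = second then some res else none := by
  fun_induction pvAFor cs second j res with
  | case1 j h hne =>
    have hd : cs.drop j = cs[j] :: cs.drop (j + 1) := List.drop_eq_getElem_cons h
    rw [hd, if_neg]; simp only [List.mem_cons]
    intro hall; exact hne (hall cs[j] (Or.inl rfl))
  | case2 j h heq ih =>
    have hd : cs.drop j = cs[j] :: cs.drop (j + 1) := List.drop_eq_getElem_cons h
    rw [ih, hd]
    simp only [ne_eq, not_not] at heq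
    congr 1
    simp only [List.mem_cons, eq_iff_iff]
    constructor
    · intro hall x hx
      rcases hx with h' | h'
      · exact h' ▸ heq
      · exact hall x h'
    · intro hall x hx; exact hall x (Or.inr hx)
  | case3 j h =>
    rw [List.drop_eq_nil_of_le (by omega)]; simp

theorem pvRunsAux_eq (c : Char) (n : Nat) (l : List Char) :
    pvRunsAux c n l = (n + pvLead c l) :: pvRuns (l.drop (pvLead c l)) := by
  induction l generalizing c n with
  | nil => simp [pvRunsAux, pvLead, pvRuns]
  | cons d r ih =>
    by_cases h : d = c
    · subst h
      rw [pvRunsAux, if_pos rfl, ih, pvLead, if_pos rfl]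
      simp only [List.drop_succ_cons]
      congr 1; omega
    · rw [pvRunsAux, if_neg h, pvLead, if_neg h]
      simp [pvRuns]

theorem pvGetD_drop (cs : List Char) (i : Nat) (d t) (h : cs.drop i = d :: t) :
    cs.getD i ' ' = d := by
  have : cs[i]? = some d := by rw [← List.head?_drop, h]; rfl
  simp [List.getD_eq_getElem?_getD, this]

theorem pvRuns_eq_nil_iff (l : List Char) : pvRuns l = [] ↔ l = [] := by
  cases l with
  | nil => simp [pvRuns]
  | cons c r => rw [pvRuns, pvRunsAux_eq]; simp

theorem detect_core (cs : List Char) :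
    (if cs.length < 2 then none
     else
       if pvAWhile cs (cs.getD 0 ' ') 1 = cs.length then none
       else
         pvAFor cs (cs.getD (pvAWhile cs (cs.getD 0 ' ') 1) ' ')
           (pvAWhile cs (cs.getD 0 ' ') 1 + 1)
           (Int.ofNat (pvAWhile cs (cs.getD 0 ' ') 1))) =
    (if cs.length < 2 then none
     else match pvRuns cs with
          | [a, _] => some (Int.ofNat a)
          | _ => none) := by
  by_cases hlen : cs.length < 2
  · simp [hlen]
  · rw [if_neg hlen, if_neg hlen]
    obtain ⟨a, rest, rfl⟩ : ∃ a rest, cs = a :: rest := by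
      cases cs with
      | nil => simp at hlen
      | cons a rest => exact ⟨a, rest, rfl⟩
    have hfirst : (a :: rest).getD 0 ' ' = a := rfl
    have hdrop1 : (a :: rest).drop 1 = rest := rfl
    rw [hfirst, pvAWhile_eq, hdrop1]
    set k := pvLead a rest with hk
    have hklen : k ≤ rest.length := pvLead_le a rest
    have hruns : pvRuns (a :: rest) = (1 + k) :: pvRuns (rest.drop k) := by
      rw [pvRuns, pvRunsAux_eq]
    by_cases hEnd : 1 + k = (a :: rest).length
    · rw [if_pos hEnd]
      have hnil : rest.drop k = [] := by
        apply List.drop_eq_nil_of_le; simp at hEnd; omega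
      rw [hruns, hnil]
      rfl
    · rw [if_neg hEnd]
      simp only [List.length_cons] at hEnd
      have hklt : k < rest.length := by omega
      obtain ⟨d, t2, hdt⟩ : ∃ d t2, rest.drop k = d :: t2 := by
        cases h : rest.drop k with
        | nil => exact absurd (List.drop_eq_nil_iff.mp h) (by omega)
        | cons d t2 => exact ⟨d, t2, rfl⟩
      have hdt' : (a :: rest).drop (1 + k) = d :: t2 := by
        rw [Nat.add_comm, List.drop_succ_cons]; exact hdt
      have hsec : (a :: rest).getD (1 + k) ' ' = d := pvGetD_drop _ _ _ t2 hdt'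
      rw [hsec, pvAFor_eq]
      have hdrop2 : (a :: rest).drop (1 + k + 1) = t2 := by
        have h1 : (a :: rest).drop (1 + k) = d :: t2 := hdt'
        have h2 : (a :: rest).drop (1 + k + 1) = ((a :: rest).drop (1 + k)).drop 1 := by
          rw [List.drop_drop]
        rw [h2, h1, List.drop_succ_cons, List.drop_zero]
      rw [hdrop2, hruns, hdt, pvRuns, pvRunsAux_eq]
      by_cases hall : ∀ x ∈ t2, x = d
      · rw [if_pos hall]
        have hl : pvLead d t2 = t2.length := (pvLead_eq_length_iff d t2).mpr hall
        rw [hl, List.drop_length]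
        rfl
      · rw [if_neg hall]
        have hne : pvLead d t2 ≠ t2.length := fun h =>
          hall ((pvLead_eq_length_iff d t2).mp h)
        have hnn : pvRuns (t2.drop (pvLead d t2)) ≠ [] := by
          intro hc
          have h0 := (pvRuns_eq_nil_iff _).mp hc
          have h1 := List.drop_eq_nil_iff.mp h0
          have := pvLead_le d t2; omega
        cases h : pvRuns (t2.drop (pvLead d t2)) with
        | nil => exact absurd h hnn
        | cons x xs => rfl

-- ===== VERDICT (by name: the statement is the Claim_ definition above) =====
theorem detect_homogeneous_blocks_py_spec : Claim_equal_detect_homogeneous_blocks_py := by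
  intro s _
  show detect_homogeneous_blocks_py s = detect_homogeneous_blocks_py_alt s
  unfold detect_homogeneous_blocks_py detect_homogeneous_blocks_py_alt
  exact detect_core s.toList
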